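-- pv_equiv track=rewrite | github.com/relayr/kafka-python | kafka/coordinator/assignors/sticky/partition_movements.py | _is_subcycle
-- ===== SOURCE A (Python) =====
-- from copy import deepcopy
-- from typing import Dict, Set, List, Tuple, NamedTuple
--
-- def is_sublist(source: List, target: Tuple) -> bool:
--     """Checks if one list is a sublist of another.
--
--     Arguments:
--       source: the list in which to search for the occurrence of target.
--       target: the list to search for as a sublist of source
--
--     Returns:
--       true if target is in source; false otherwise
--     """
--     for index in (i for i, e in enumerate(source) if e == target[0]):
--         if tuple(source[index: index + len(target)]) == target:
--             return True
--     return False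
--
-- def _is_subcycle(cycle: List[str], cycles: Set[Tuple[str]]) -> bool:
--     super_cycle = deepcopy(cycle)
--     super_cycle = super_cycle[:-1]
--     super_cycle.extend(cycle)
--     for found_cycle in cycles:
--         if len(found_cycle) == len(cycle) and is_sublist(super_cycle, found_cycle):
--             return True
--     return False
-- ===== SOURCE B (Python) =====
-- def _is_subcycle(cycle, cycles):
--     n = len(cycle)
--     super_cycle = cycle[:-1] + cycle
--     rotations = {tuple(super_cycle[i:i + n]) for i in range(n)}
--     return any(fc in rotations for fc in cycles)
-- ===== Notes on version B (the rewrite author's own statement) =====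
-- stated objective: alternative
-- what changed: B precomputes the set of all n rotations of the cycle once and answers each candidate with a single set-membership test, replacing A's per-candidate substring scan of the doubled cycle.
import Mathlib
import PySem

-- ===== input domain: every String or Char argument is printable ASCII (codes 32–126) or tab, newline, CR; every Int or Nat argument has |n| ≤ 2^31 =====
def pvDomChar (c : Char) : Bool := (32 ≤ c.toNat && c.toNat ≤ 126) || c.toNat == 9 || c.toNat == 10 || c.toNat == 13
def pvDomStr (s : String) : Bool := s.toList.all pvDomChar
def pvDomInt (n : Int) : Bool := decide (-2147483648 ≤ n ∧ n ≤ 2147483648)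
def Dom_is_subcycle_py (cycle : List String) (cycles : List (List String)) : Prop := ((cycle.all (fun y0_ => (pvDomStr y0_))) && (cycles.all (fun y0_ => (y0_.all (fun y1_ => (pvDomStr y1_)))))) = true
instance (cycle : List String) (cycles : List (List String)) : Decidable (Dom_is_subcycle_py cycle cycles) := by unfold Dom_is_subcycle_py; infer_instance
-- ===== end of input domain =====

-- B builds the set of all rotations of `cycle` once and answers each candidate by set membership,
-- instead of A's per-candidate substring scan of the doubled cycle (objective: alternative).

-- ===== PORT A =====
-- port of is_sublist: 'for index in (i for i, e in enumerate(source) if e == target[0]): if tuple(source[index:index+len(target)]) == target: return True'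
-- (target[0] on an empty target raises in Python; every call made by _is_subcycle has source = [] in that case, so the branch is unreachable)
def is_sublist (source : List String) (target : List String) : Bool :=
  (PySem.List.enumerate source).any fun ie =>
    (some ie.2 == PySem.List.pyGet? target 0) &&
    (PySem.List.slice source (some ie.1) (some (ie.1 + PySem.List.len target)) == target)

def is_subcycle_py (cycle : List String) (cycles : List (List String)) : Bool :=
  let super_cycle := cycle                                        -- deepcopy(cycle)
  let super_cycle := PySem.List.slice super_cycle none (some (-1)) -- super_cycle[:-1]
  let super_cycle := super_cycle ++ cycle                          -- .extend(cycle)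
  cycles.any fun found_cycle =>
    (PySem.List.len found_cycle == PySem.List.len cycle) && is_sublist super_cycle found_cycle

-- ===== PORT B =====
def is_subcycle_py_alt (cycle : List String) (cycles : List (List String)) : Bool :=
  let n := PySem.List.len cycle
  let super_cycle := PySem.List.slice cycle none (some (-1)) ++ cycle
  let rotations : PySem.Set (List String) :=
    PySem.Set.ofList ((PySem.List.pyRange 0 n).map fun i =>
      PySem.List.slice super_cycle (some i) (some (i + n)))
  cycles.any fun fc => rotations.contains fc

-- ===== PRECONDITION & SPEC =====
def Spec_is_subcycle_py (cycle : List String) (cycles : List (List String)) (out : Bool) : Prop := out = is_subcycle_py_alt cycle cycles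
instance (cycle : List String) (cycles : List (List String)) (out : Bool) : Decidable (Spec_is_subcycle_py cycle cycles out) := by unfold Spec_is_subcycle_py; infer_instance

-- ===== CLAIM (what is proved, stated in full; the proofs are below) =====
def Claim_equal_is_subcycle_py : Prop := ∀ (cycle : List String) (cycles : List (List String)), Dom_is_subcycle_py cycle cycles → Spec_is_subcycle_py cycle cycles (is_subcycle_py cycle cycles)

-- ===== LEMMAS AND PROOFS =====

lemma mem_enumerate_iff {α : Type} (xs : List α) (s : Int) (p : Int × α) :
    p ∈ PySem.List.enumerate xs s ↔ ∃ k : Nat, ∃ _ : k < xs.length, p = (s + k, xs[k]) := by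
  induction xs generalizing s with
  | nil => simp [PySem.List.enumerate]
  | cons x t ih =>
    simp only [PySem.List.enumerate, List.mem_cons, ih]
    constructor
    · rintro (rfl | ⟨k, hk, rfl⟩)
      · exact ⟨0, by simp, by simp⟩
      · refine ⟨k + 1, by simp only [List.length_cons]; omega, ?_⟩
        simp only [List.getElem_cons_succ, Prod.mk.injEq, and_true]
        push_cast; ring
    · rintro ⟨k, hk, rfl⟩
      cases k with
      | zero => left; simp
      | succ k =>
        right
        refine ⟨k, by simp only [List.length_cons] at hk; omega, ?_⟩
        simp only [List.getElem_cons_succ, Prod.mk.injEq, and_true]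
        push_cast; ring

-- the heart of the equivalence: for each candidate, A's length-guarded substring scan
-- agrees with membership in B's rotation set
lemma key_pointwise (cycle fc : List String) :
    ((PySem.List.len fc == PySem.List.len cycle) && is_sublist (cycle.dropLast ++ cycle) fc)
    = (PySem.Set.ofList ((List.range cycle.length).map fun (k : Nat) =>
        PySem.List.slice (cycle.dropLast ++ cycle) (some (k : Int)) (some ((k : Int) + (cycle.length : Int))))).contains fc := by
  set sup := cycle.dropLast ++ cycle with hsup
  set n := cycle.length with hn
  have hdl : sup.length = (n - 1) + n := by
    rw [hsup]; simp only [List.length_append, List.length_dropLast]; omega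
  have hmapeq : (List.range n).map (fun (k : Nat) => PySem.List.slice sup (some (k : Int)) (some ((k : Int) + (n : Int))))
      = (List.range n).map (fun k => List.take n (List.drop k sup)) := by
    apply List.map_congr_left
    intro k _
    exact PySem.List.slice_natCast_add sup k n
  rw [hmapeq, Bool.eq_iff_iff, PySem.Set.contains_iff, PySem.Set.mem_ofList]
  simp only [Bool.and_eq_true, beq_iff_eq, PySem.List.len_eq, is_sublist,
    List.any_eq_true, List.mem_map, List.mem_range, Nat.cast_inj]
  constructor
  · rintro ⟨hlen, ie, hmem, hhead, hslice⟩
    obtain ⟨k, hk, rfl⟩ := (mem_enumerate_iff sup 0 ie).1 hmem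
    simp only [zero_add] at hslice
    rw [PySem.List.slice_natCast_add] at hslice
    refine ⟨k, ?_, ?_⟩
    · -- the matched window has full length fc.length = n, so k < n
      have hl := congrArg List.length hslice
      simp only [List.length_take, List.length_drop] at hl
      omega
    · have hlen' : fc.length = n := by omega
      rw [← hlen']; exact hslice
  · rintro ⟨k, hk, rfl⟩
    have hn1 : 1 ≤ n := by omega
    have hksup : k < sup.length := by omega
    have hwl : (List.take n (List.drop k sup)).length = n := by
      simp only [List.length_take, List.length_drop]; omega
    refine ⟨hwl, ((0 : Int) + (k : Int), sup[k]), (mem_enumerate_iff sup 0 _).2 ⟨k, hksup, rfl⟩, ?_, ?_⟩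
    · -- sup[k] is the head of the window
      rw [PySem.List.pyGet?_zero, List.getElem?_take_of_lt (by omega : (0 : Nat) < n)]
      simp [hksup]
    · simp only [zero_add, hwl]
      rw [PySem.List.slice_natCast_add]

-- ===== VERDICT (by name: the statement is the Claim_ definition above) =====
theorem is_subcycle_py_spec : Claim_equal_is_subcycle_py := by
  intro cycle cycles _
  unfold Spec_is_subcycle_py is_subcycle_py is_subcycle_py_alt
  simp only [PySem.List.slice_to_neg_one, PySem.List.len_eq,
    PySem.List.pyRange_zero_natCast, List.map_map, Function.comp_def]
  congr 1
  funext fc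
  have h := key_pointwise cycle fc
  simp only [PySem.List.len_eq] at h
  exact h
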